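-- pv_equiv track=rewrite | github.com/ShanjinurIslam/LeetCode | String/maximum_score_after_splitting_a_string.py | maxScore
-- ===== SOURCE A (Python) =====
-- def maxScore(s):
--     max_val = -1
--
--     for i in range(1,len(s)):
--         zeros = s[:i].count('0')
--         ones = s[i:].count('1')
--
--         max_val = max(max_val,zeros+ones)
--
--     return max_val
--
--
--     """
--     :type s: str
--     :rtype: int
--     """
-- ===== SOURCE B (Python) =====
-- def maxScore(s):
--     # One pass: track zeros seen on the left and ones remaining on the right.
--     right_ones = s.count('1')
--     zeros = 0
--     best = -1
--     for c in s[:-1]: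
--         if c == '0':
--             zeros += 1
--         elif c == '1':
--             right_ones -= 1
--         best = max(best, zeros + right_ones)
--     return best
-- ===== Notes on version B (the rewrite author's own statement) =====
-- stated objective: faster
-- what changed: Replaced the quadratic loop that recounts both slices at every split with a single pass that precomputes the total number of ones and incrementally maintains left-zero and right-one counts.
import Mathlib
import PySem

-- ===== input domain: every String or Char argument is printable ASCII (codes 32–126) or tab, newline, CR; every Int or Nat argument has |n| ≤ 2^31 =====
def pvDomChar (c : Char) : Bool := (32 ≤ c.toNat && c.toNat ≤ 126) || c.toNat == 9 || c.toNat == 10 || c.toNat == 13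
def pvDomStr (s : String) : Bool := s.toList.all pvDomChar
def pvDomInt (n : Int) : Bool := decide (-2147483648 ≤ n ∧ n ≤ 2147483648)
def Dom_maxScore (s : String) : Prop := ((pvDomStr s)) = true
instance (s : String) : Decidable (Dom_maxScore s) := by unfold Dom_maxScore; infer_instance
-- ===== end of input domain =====

-- B replaces A's quadratic recount-both-slices-per-split loop by one linear pass that
-- precomputes the total ones and maintains left zeros / right ones incrementally.

-- ===== PORT A =====
-- for i in range(1, len(s)): zeros = s[:i].count('0'); ones = s[i:].count('1'); max_val = max(max_val, zeros+ones)
def maxScore (s : String) : Int :=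
  (PySem.List.pyRange 1 (PySem.Str.len s) 1).foldl
    (fun max_val i =>
      let zeros : Int := (PySem.Chars.count (PySem.List.slice s.toList none (some i)) ['0'] : Int)
      let ones : Int := (PySem.Chars.count (PySem.List.slice s.toList (some i) none) ['1'] : Int)
      max max_val (zeros + ones))
    (-1)

-- ===== PORT B =====
-- right_ones = s.count('1'); one pass over s[:-1] maintaining (best, zeros, right_ones)
def maxScore_alt (s : String) : Int :=
  let rightOnes : Int := (PySem.Chars.count s.toList ['1'] : Int)
  ((PySem.List.slice s.toList none (some (-1))).foldl
    (fun (st : Int × Int × Int) c =>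
      let zeros := if c = '0' then st.2.1 + 1 else st.2.1
      let ro := if c ≠ '0' ∧ c = '1' then st.2.2 - 1 else st.2.2
      (max st.1 (zeros + ro), zeros, ro))
    (-1, 0, rightOnes)).1

-- ===== PRECONDITION & SPEC =====
def Spec_maxScore (s : String) (out : Int) : Prop := out = maxScore_alt s
instance (s : String) (out : Int) : Decidable (Spec_maxScore s out) := by unfold Spec_maxScore; infer_instance

-- ===== CLAIM (what is proved, stated in full; the proofs are below) =====
def Claim_equal_maxScore : Prop := ∀ (s : String), Dom_maxScore s → Spec_maxScore s (maxScore s)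

-- ===== LEMMAS AND PROOFS =====

-- Chars.count with a single-character needle is List.count.
theorem chars_count_go_single (c : Char) : ∀ (fuel : Nat) (l : List Char) (acc : Nat),
    l.length ≤ fuel → PySem.Chars.count.go [c] fuel l acc = acc + l.count c := by
  intro fuel
  induction fuel with
  | zero => intro l acc h; cases l with
    | nil => simp [PySem.Chars.count.go]
    | cons a t => simp at h
  | succ n ih =>
    intro l acc h
    cases l with
    | nil => simp [PySem.Chars.count.go]
    | cons a t =>
      simp only [PySem.Chars.count.go]
      by_cases hc : c = a
      · subst hc
        simp only [List.isPrefixOf, BEq.rfl, Bool.and_true, if_true]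
        rw [show ([c].length) = 1 from rfl, List.drop_one, List.tail_cons,
          ih t (acc + 1) (by simpa using Nat.le_of_succ_le_succ h)]
        simp; omega
      · have hpre : ([c].isPrefixOf (a :: t)) = false := by
          simp [List.isPrefixOf, hc]
        rw [hpre]
        simp only [Bool.false_eq_true, if_false]
        rw [ih t acc (by simpa using Nat.le_of_succ_le_succ h)]
        simp [Ne.symm hc]

theorem chars_count_single (l : List Char) (c : Char) :
    PySem.Chars.count l [c] = l.count c := by
  simp [PySem.Chars.count, chars_count_go_single c l.length l 0 le_rfl]

-- B's loop step, named so the fold can be characterised.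
def bstep (st : Int × Int × Int) (c : Char) : Int × Int × Int :=
  let zeros := if c = '0' then st.2.1 + 1 else st.2.1
  let ro := if c ≠ '0' ∧ c = '1' then st.2.2 - 1 else st.2.2
  (max st.1 (zeros + ro), zeros, ro)

-- B's pass over any list from any state is the max over all nonempty prefixes.
theorem bfold_spec : ∀ (l : List Char) (best z o : Int),
    l.foldl bstep (best, z, o) =
      ((List.range l.length).foldl
        (fun m k => max m ((z + (l.take (k+1)).count '0') + (o - (l.take (k+1)).count '1'))) best,
       z + l.count '0', o - l.count '1') := by
  intro l
  induction l with
  | nil => simp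
  | cons a t ih =>
    intro best z o
    simp only [List.foldl_cons]
    rw [show bstep (best, z, o) a =
        (max best ((z + ([a].count '0')) + (o - [a].count '1')),
         z + [a].count '0', o - [a].count '1') by
      simp only [bstep, List.count_cons, List.count_nil]
      by_cases h0 : a = '0' <;> by_cases h1 : a = '1' <;> simp_all]
    rw [ih]
    have hcnt0 : (z + ([a].count '0' : Int)) + (t.count '0' : Int) = z + ((a :: t).count '0' : Int) := by
      simp only [List.count_cons, List.count_nil]
      by_cases h : a = '0' <;> simp [h] ; ring
    have hcnt1 : (o - ([a].count '1' : Int)) - (t.count '1' : Int) = o - ((a :: t).count '1' : Int) := by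
      simp only [List.count_cons, List.count_nil]
      by_cases h : a = '1' <;> simp [h] ; ring
    refine Prod.ext ?_ (Prod.ext (by simpa using hcnt0) (by simpa using hcnt1))
    simp only [List.length_cons, List.range_succ_eq_map, List.foldl_cons, List.foldl_map,
      List.take_succ_cons]
    congr 1
    funext m k
    congr 2 <;>
    · simp only [List.count_cons, List.count_nil]
      by_cases h0 : a = '0' <;> by_cases h1 : a = '1' <;> simp [h0, h1] <;> ring

-- a prefix of dropLast is a prefix of the list itself
theorem take_dropLast_eq {α : Type} (l : List α) (k : Nat) (h : k < l.length) :
    l.dropLast.take k = l.take k := by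
  rw [List.dropLast_eq_take, List.take_take]
  congr 1
  omega

-- ===== VERDICT (by name: the statement is the Claim_ definition above) =====
theorem maxScore_spec : Claim_equal_maxScore := by
  intro s _
  show maxScore s = maxScore_alt s
  show (PySem.List.pyRange 1 (PySem.Str.len s) 1).foldl
      (fun max_val i =>
        ((PySem.Chars.count (PySem.List.slice s.toList none (some i)) ['0'] : Int)) +
          ((PySem.Chars.count (PySem.List.slice s.toList (some i) none) ['1'] : Int)) |> max max_val)
      (-1)
    = ((PySem.List.slice s.toList none (some (-1))).foldl bstep
        (-1, 0, (PySem.Chars.count s.toList ['1'] : Int))).1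
  rw [PySem.List.slice_to_neg_one, bfold_spec]
  simp only [chars_count_single, PySem.Str.len_eq, PySem.List.pyRange_one, List.foldl_map]
  have hlen : s.toList.dropLast.length = s.toList.length - 1 := List.length_dropLast
  have hn : ((s.toList.length : Int) - 1).toNat = s.toList.length - 1 := by omega
  rw [hlen, hn]
  apply PySem.List.foldl_congr_mem
  intro m k hk
  rw [List.mem_range] at hk
  have hk1 : k + 1 < s.toList.length := by omega
  have h1k : (1 : Int) + (k : Int) = ((k + 1 : Nat) : Int) := by push_cast; ring
  rw [h1k, PySem.List.slice_to s.toList (by positivity),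
      PySem.List.slice_from s.toList (by positivity), Int.toNat_natCast,
      take_dropLast_eq s.toList (k+1) hk1]
  congr 1
  have hsplit : (s.toList.take (k+1)).count '1' + (s.toList.drop (k+1)).count '1'
      = s.toList.count '1' := by
    rw [← List.count_append, List.take_append_drop]
  have := congrArg (fun n : Nat => (n : Int)) hsplit
  push_cast at this
  omega
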